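-- pv_equiv track=rewrite | github.com/pypi-data/pypi-mirror-311 | packages/bioflow-insight/bioflow_insight-1.0.8-py3-none-any.whl/src/outils_graph.py | get_name_new_node
-- ===== SOURCE A (Python) =====
-- def get_name_new_node(new_nodes, relevant_modules):
--     for r in relevant_modules:
--         for new in new_nodes:
--             if(r in new):
--                 return r
--     #Arbitrary choice of choosing the name with the longest name
--     longest_name = new_nodes[0][0]
--     for name in new_nodes:
--         if(len(longest_name)<len(name[0])):
--             longest_name = name[0]
--
--     return longest_name
-- ===== SOURCE B (Python) =====
-- def get_name_new_node(new_nodes, relevant_modules):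
--     # Inverted traversal: index the modules once by first position, scan the
--     # data once collecting positions, and return the module at the minimum one.
--     rank = {}
--     for i, r in enumerate(relevant_modules):
--         rank.setdefault(r, i)
--     hits = [rank[x] for new in new_nodes for x in new if x in rank]
--     if hits:
--         return relevant_modules[min(hits)]
--     return max((name[0] for name in new_nodes), key=len)
-- ===== Notes on version B (the rewrite author's own statement) =====
-- stated objective: alternative
-- what changed: B inverts the traversal: it builds a first-position index of relevant_modules once, makes a single pass over the flattened new_nodes collecting the positions of matching elements, and returns the module at the minimum position (A instead scans all of new_nodes once per module); the longest-name fallback becomes max(key=len).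
import Mathlib
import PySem

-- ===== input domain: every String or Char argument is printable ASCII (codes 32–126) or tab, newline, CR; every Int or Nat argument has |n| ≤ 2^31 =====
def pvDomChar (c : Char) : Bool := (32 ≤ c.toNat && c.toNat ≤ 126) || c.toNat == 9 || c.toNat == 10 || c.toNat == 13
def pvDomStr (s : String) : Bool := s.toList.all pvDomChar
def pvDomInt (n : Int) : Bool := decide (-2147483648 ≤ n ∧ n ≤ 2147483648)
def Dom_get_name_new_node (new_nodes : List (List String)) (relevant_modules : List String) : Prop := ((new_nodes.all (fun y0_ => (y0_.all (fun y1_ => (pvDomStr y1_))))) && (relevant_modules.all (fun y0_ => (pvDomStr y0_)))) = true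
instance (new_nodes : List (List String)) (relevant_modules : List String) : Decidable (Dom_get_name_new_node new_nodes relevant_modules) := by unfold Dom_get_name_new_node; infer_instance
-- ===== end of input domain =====

-- B inverts the traversal: a first-position index of relevant_modules, one pass over the
-- flattened new_nodes taking the minimum position; alternative decomposition, same cost class.


-- ===== PORT A =====
-- inner loop: 'for new in new_nodes: if r in new: return r'
def aInner (r : String) : List (List String) → Bool
  | [] => false
  | new :: rest => if new.contains r then true else aInner r rest

-- outer loop over relevant_modules with early return
def aSearch : List String → List (List String) → Option String
  | [], _ => none
  | r :: rs, nn => if aInner r nn then some r else aSearch rs nn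

-- fallback loop: longest first element (strict '<', so the FIRST longest wins);
-- name[0] is headD "" — Pre_ guarantees every tuple is nonempty on this path
def aLongest (longest : String) : List (List String) → String
  | [] => longest
  | name :: rest =>
      aLongest (if PySem.Str.len longest < PySem.Str.len (name.headD "") then name.headD "" else longest) rest

def get_name_new_node (new_nodes : List (List String)) (relevant_modules : List String) : String :=
  match aSearch relevant_modules new_nodes with
  | some r => r
  | none => aLongest ((new_nodes.headD []).headD "") new_nodes

-- ===== PORT B =====
-- rank = {}; for i, r in enumerate(relevant_modules): rank.setdefault(r, i)
def bRank (relevant_modules : List String) : PySem.Dict String Int :=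
  (PySem.List.enumerate relevant_modules 0).foldl
    (fun d p => d.setdefault p.2 p.1) PySem.Dict.empty

def get_name_new_node_alt (new_nodes : List (List String)) (relevant_modules : List String) : String :=
  -- rank = bRank relevant_modules; hits = [rank[x] for new in new_nodes for x in new if x in rank]
  -- if hits: return relevant_modules[min(hits)]
  match PySem.List.min? (new_nodes.flatten.filterMap (fun x => (bRank relevant_modules).get? x)) (fun y => y) with
  | some i => (PySem.List.pyGet? relevant_modules i).getD ""
  | none =>
      -- max((name[0] for name in new_nodes), key=len); [] only outside Pre_, getD "" there
      (PySem.List.max? (new_nodes.map (fun name => name.headD "")) (fun s => PySem.Str.len s)).getD ""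

-- ===== PRECONDITION & SPEC =====
-- Pre_ excludes exactly the inputs where Python A raises IndexError: the fallback path
-- (no module name occurs in any tuple) with new_nodes empty or containing an empty tuple.
def Pre_get_name_new_node (new_nodes : List (List String)) (relevant_modules : List String) : Prop :=
  (∃ r ∈ relevant_modules, ∃ new ∈ new_nodes, r ∈ new) ∨
  (new_nodes ≠ [] ∧ ∀ name ∈ new_nodes, name ≠ [])

instance (new_nodes : List (List String)) (relevant_modules : List String) : Decidable (Pre_get_name_new_node new_nodes relevant_modules) := by unfold Pre_get_name_new_node; infer_instance

def pvWitness_get_name_new_node : List (List String) × List String := ([["alpha"], ["beta", "g"]], ["x", "beta"])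

def Spec_get_name_new_node (new_nodes : List (List String)) (relevant_modules : List String) (out : String) : Prop := out = get_name_new_node_alt new_nodes relevant_modules
instance (new_nodes : List (List String)) (relevant_modules : List String) (out : String) : Decidable (Spec_get_name_new_node new_nodes relevant_modules out) := by unfold Spec_get_name_new_node; infer_instance

-- ===== CLAIM (what is proved, stated in full; the proofs are below) =====
def Claim_equal_get_name_new_node : Prop := ∀ (new_nodes : List (List String)) (relevant_modules : List String), Dom_get_name_new_node new_nodes relevant_modules → Pre_get_name_new_node new_nodes relevant_modules → Spec_get_name_new_node new_nodes relevant_modules (get_name_new_node new_nodes relevant_modules)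

-- ===== LEMMAS AND PROOFS =====

-- first index (from offset n) of x in a list: the value rank stores for x
def firstIdx (x : String) : List String → Int → Option Int
  | [], _ => none
  | a :: t, n => if a = x then some n else firstIdx x t (n + 1)

theorem firstIdx_ge (x : String) (l : List String) (n i : Int)
    (h : firstIdx x l n = some i) : n ≤ i := by
  induction l generalizing n with
  | nil => simp [firstIdx] at h
  | cons a t ih =>
      unfold firstIdx at h
      split at h
      · simp only [Option.some.injEq] at h; omega
      · have := ih (n + 1) h; omega

-- the setdefault loop stores the first index of each key
theorem bRank_fold (l : List String) (n : Int) (d : PySem.Dict String Int) (x : String) :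
    ((PySem.List.enumerate l n).foldl (fun d p => d.setdefault p.2 p.1) d).get? x
      = ((d.get? x).or (firstIdx x l n)) := by
  induction l generalizing n d with
  | nil => simp [PySem.List.enumerate_nil, firstIdx]
  | cons a t ih =>
      rw [PySem.List.enumerate_cons]
      simp only [List.foldl_cons]
      rw [ih]
      by_cases hx : a = x
      · subst hx
        rw [PySem.Dict.get?_setdefault_self]
        cases h : d.get? a <;> simp [firstIdx]
      · rw [PySem.Dict.get?_setdefault_of_ne d n (Ne.symm hx)]
        simp [firstIdx, hx]

theorem bRank_get (rm : List String) (x : String) :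
    (bRank rm).get? x = firstIdx x rm 0 := by
  rw [bRank, bRank_fold]
  simp [PySem.Dict.get?_empty]

-- search over the flattened data
def sFind : List String → List String → Option String
  | [], _ => none
  | r :: rs, flat => if r ∈ flat then some r else sFind rs flat

theorem aInner_eq_mem_flatten (r : String) (nn : List (List String)) :
    aInner r nn = decide (r ∈ nn.flatten) := by
  induction nn with
  | nil => simp [aInner]
  | cons n rest ih => by_cases h : r ∈ n <;> simp_all [aInner]

theorem aSearch_eq_sFind (rm : List String) (nn : List (List String)) :
    aSearch rm nn = sFind rm nn.flatten := by
  induction rm with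
  | nil => rfl
  | cons r rs ih => simp [aSearch, sFind, aInner_eq_mem_flatten, ih]

-- min? characterization: a member below all members is the minimum
theorem min?_eq_of_mem_of_le (l : List Int) (n : Int)
    (h1 : n ∈ l) (h2 : ∀ j ∈ l, n ≤ j) :
    PySem.List.min? l (fun y => y) = some n := by
  cases hm : PySem.List.min? l (fun y => y) with
  | none =>
      rw [PySem.List.min?_eq_none_iff] at hm
      subst hm; simp at h1
  | some m =>
      have hmem := PySem.List.min?_mem hm
      have hle := PySem.List.min?_isMin hm n h1
      have := h2 m hmem
      simp only [Option.some.injEq]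
      omega

-- the main correspondence, generalized over the offset
theorem main_corr (flat : List String) (rm : List String) (n : Int) :
    (PySem.List.min? (flat.filterMap (fun x => firstIdx x rm n)) (fun y => y)).map
        (fun i => (PySem.List.pyGet? rm (i - n)).getD "")
      = sFind rm flat := by
  induction rm generalizing n with
  | nil =>
      have : flat.filterMap (fun x => firstIdx x ([] : List String) n) = [] := by
        simp [firstIdx]
      simp [this, PySem.List.min?, sFind]
  | cons r rs ih =>
      by_cases hr : r ∈ flat
      · -- minimum is n, realized by x = r
        have hmem : n ∈ flat.filterMap (fun x => firstIdx x (r :: rs) n) := by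
          rw [List.mem_filterMap]
          exact ⟨r, hr, by simp [firstIdx]⟩
        have hge : ∀ j ∈ flat.filterMap (fun x => firstIdx x (r :: rs) n), n ≤ j := by
          intro j hj
          rw [List.mem_filterMap] at hj
          obtain ⟨x, _, hx⟩ := hj
          exact firstIdx_ge x _ n j hx
        rw [min?_eq_of_mem_of_le _ n hmem hge]
        simp [sFind, hr]
      · -- r matches nothing in flat: the hits are exactly those of rs from n+1
        have hshift : flat.filterMap (fun x => firstIdx x (r :: rs) n)
            = flat.filterMap (fun x => firstIdx x rs (n + 1)) := by
          apply List.filterMap_congr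
          intro x hx
          have : r ≠ x := fun h => hr (h ▸ hx)
          simp [firstIdx, this]
        rw [hshift]
        cases hm : PySem.List.min? (flat.filterMap (fun x => firstIdx x rs (n + 1))) (fun y => y) with
        | none =>
            have := ih (n + 1); rw [hm] at this
            simp only [Option.map_none] at this
            simp [sFind, hr, ← this]
        | some i =>
            have hi : n + 1 ≤ i := by
              have := PySem.List.min?_mem hm
              rw [List.mem_filterMap] at this
              obtain ⟨x, _, hx⟩ := this
              exact firstIdx_ge x _ _ _ hx
            have hstep : PySem.List.pyGet? (r :: rs) (i - n) = PySem.List.pyGet? rs (i - (n + 1)) := by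
              have h1 : i - n = ((i - (n + 1)) + 1 : Int) := by ring
              have h2 : i - (n + 1) = ((i - (n + 1)).toNat : Int) := by omega
              rw [h1, h2, PySem.List.pyGet?_cons_succ]
            have := ih (n + 1); rw [hm] at this
            simp only [Option.map_some] at this
            simp [sFind, hr, ← this, hstep]

-- the fallback loop is the running max? fold of max(key=len)
theorem longest_eq (l : List (List String)) (m : String) :
    PySem.List.max? (m :: l.map (fun name => name.headD "")) (fun s => PySem.Str.len s) = some (aLongest m l) := by
  induction l generalizing m with
  | nil => rfl
  | cons n rest ih =>
      have h1 : PySem.List.max? (m :: (n :: rest).map (fun name => name.headD "")) (fun s => PySem.Str.len s)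
          = PySem.List.max? ((if PySem.Str.len m < PySem.Str.len (n.headD "") then n.headD "" else m)
              :: rest.map (fun name => name.headD "")) (fun s => PySem.Str.len s) := by
        simp only [PySem.List.max?, List.map_cons, List.foldl_cons]
        rw [apply_ite some]
      rw [h1, ih]
      rfl

-- failed search means no match existed
theorem sFind_none (rm : List String) (flat : List String)
    (h : sFind rm flat = none) : ¬ ∃ r ∈ rm, r ∈ flat := by
  induction rm with
  | nil => simp
  | cons r rs ih =>
      unfold sFind at h
      split at h
      · simp at h
      · rintro ⟨r', hr', hm⟩
        rcases List.mem_cons.mp hr' with h1 | h1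
        · subst h1; simp_all
        · exact ih h ⟨r', h1, hm⟩

-- ===== VERDICT (by name: the statement is the Claim_ definition above) =====
theorem get_name_new_node_spec : Claim_equal_get_name_new_node := by
  intro nn rm _ hpre
  unfold Spec_get_name_new_node get_name_new_node get_name_new_node_alt
  have hrank : nn.flatten.filterMap (fun x => (bRank rm).get? x)
      = nn.flatten.filterMap (fun x => firstIdx x rm 0) := by
    apply List.filterMap_congr
    intro x _
    exact bRank_get rm x
  rw [aSearch_eq_sFind, hrank]
  have hcorr := main_corr nn.flatten rm 0
  cases hm : PySem.List.min? (nn.flatten.filterMap (fun x => firstIdx x rm 0)) (fun y => y) with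
  | some i =>
      rw [hm] at hcorr
      simp only [Option.map_some, sub_zero] at hcorr
      simp [← hcorr]
  | none =>
      rw [hm] at hcorr
      simp only [Option.map_none] at hcorr
      rw [← hcorr]
      rcases hpre with hmatch | ⟨hne, _⟩
      · obtain ⟨r, hr, new, hnew, hmem⟩ := hmatch
        exact absurd ⟨r, hr, List.mem_flatten.mpr ⟨new, hnew, hmem⟩⟩ (sFind_none rm nn.flatten hcorr.symm)
      · cases nn with
        | nil => exact absurd rfl hne
        | cons n0 rest =>
            rw [List.map_cons, longest_eq rest (n0.headD ""), Option.getD_some]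
            show aLongest (n0.headD "") (n0 :: rest) = aLongest (n0.headD "") rest
            rw [aLongest, if_neg (lt_irrefl _)]
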